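-- pv_equiv track=rewrite | github.com/jeokrohn/pynanp | pynanp.py | single_pattern
-- ===== SOURCE A (Python) =====
-- def single_pattern(prefix5d, trailing_digits, home_npa, hnpalocal7d):
--     """
--     Creates a single pattern
--     :param prefix5d: first five digits of npa/nxx
--     :param trailing_digits: allowed digits in last digit of npa/nxx
--     :param npa: home npa
--     :param hnpalocal7d: True, if HNPA local patterns should be stripped to 7D
--     :return: single pattern to be provisioned in UCM
--     """
--
--     # we want to convert the sequence of allowed trailing digits to (if possible) something like:
--     # 1-4
--     # X
--     r = ''
--     i = iter(trailing_digits)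
--     start_digit = next(i)
--     done = False
--     while not done:
--         # get a sequence
--         stop_digit = start_digit
--         digit = start_digit
--         try:
--             while True:
--                 digit = next(i)
--                 if int(digit) - int(stop_digit) == 1:
--                     stop_digit = digit
--                     continue
--                 break
--         except StopIteration:
--             done = True
--         if start_digit == stop_digit:
--             # add a single digit
--             r += start_digit
--         else:
--             if int(stop_digit) - int(start_digit) == 1:
--                 # something like "12"
--                 r += start_digit
--                 r += stop_digit
--             else:
--                 # something like "1-3"
--                 r += '{}-{}'.format(start_digit, stop_digit)
--             # if .. else ..
--         # if .. else ..
--         start_digit = digit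
--     if r == '0-9':
--         r = 'X'
--     if len(r) > 1:
--         r = '[{}]'.format(r)
--     r = '{}{}'.format(prefix5d, r)
--     if hnpalocal7d and prefix5d.startswith(home_npa):
--         r = '\\+1{npa}.{trailing}XXXX'.format(npa=home_npa, trailing=r[3:])
--     else:
--         r = '\\+1.{trailing}XXXX'.format(trailing=r)
--     return r
-- ===== SOURCE B (Python) =====
-- def single_pattern(prefix5d, trailing_digits, home_npa, hnpalocal7d):
--     # B: recursive run-splitting on the digit string. Each step measures the
--     # maximal consecutive ascent from the first digit (run_len), renders that
--     # run from its length, and recurses on the remainder. No iterator state,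
--     # no try/except, no run list.
--
--     def run_len(digs):
--         # number of +1 steps at the front of digs
--         k = 0
--         while k + 1 < len(digs) and int(digs[k + 1]) - int(digs[k]) == 1:
--             k += 1
--         return k
--
--     def render(digs):
--         if not digs:
--             return ''
--         k = run_len(digs)
--         run = digs[:k + 1]
--         start, stop = run[0], run[-1]
--         if k == 0:
--             piece = start
--         elif k == 1:
--             piece = start + stop
--         else:
--             piece = '{}-{}'.format(start, stop)
--         return piece + render(digs[k + 1:])
--
--     r = render(trailing_digits)
--     if r == '0-9':
--         r = 'X'
--     elif len(r) > 1:
--         r = '[' + r + ']'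
--     r = prefix5d + r
--     if hnpalocal7d and prefix5d.startswith(home_npa):
--         return '\\+1' + home_npa + '.' + r[3:] + 'XXXX'
--     return '\\+1.' + r + 'XXXX'
-- ===== Notes on version B (the rewrite author's own statement) =====
-- stated objective: simpler
-- what changed: Replaces A's nested while-loops threading iterator/try-except state by a recursive run-splitter: a helper measures the maximal consecutive ascent k at the front, the run is rendered from k alone (k==0 single digit, k==1 pair, else range), and the function recurses on the rest; the '0-9'/bracket post-processing collapses into one if/elif.
import Mathlib
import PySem

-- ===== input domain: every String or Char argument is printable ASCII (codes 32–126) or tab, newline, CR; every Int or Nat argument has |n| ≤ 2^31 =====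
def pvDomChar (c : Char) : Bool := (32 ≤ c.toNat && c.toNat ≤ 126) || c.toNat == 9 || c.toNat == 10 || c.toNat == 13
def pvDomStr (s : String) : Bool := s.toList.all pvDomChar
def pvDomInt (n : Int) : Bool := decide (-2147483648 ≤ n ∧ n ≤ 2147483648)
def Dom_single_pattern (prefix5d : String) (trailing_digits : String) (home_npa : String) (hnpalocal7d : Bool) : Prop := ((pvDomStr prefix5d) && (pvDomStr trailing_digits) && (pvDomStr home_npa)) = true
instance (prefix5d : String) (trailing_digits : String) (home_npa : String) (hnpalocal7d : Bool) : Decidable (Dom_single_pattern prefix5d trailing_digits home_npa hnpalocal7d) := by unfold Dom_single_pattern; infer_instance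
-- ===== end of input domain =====

-- B replaces A's nested while-loops threading iterator/try-except state by a recursive
-- run-splitter (measure the consecutive ascent k at the front, render the run from k,
-- recurse on the rest); return values proved equal on Pre_.

-- ===== PORT A =====

-- int(c) for a single digit char (exact on the digit chars Pre_ admits)
def pvAintv (c : Char) : Int := (c.toNat : Int) - 48

-- the inner 'while True: digit = next(i) …' loop: given current stop_digit and the remaining
-- iterator contents, returns (stop_digit, start_digit-for-next-round, remaining, done)
def pvAinner (stop : Char) : List Char → Char × Char × List Char × Bool
  | [] => (stop, stop, [], true)                    -- StopIteration: done = True, digit still = stop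
  | d :: rest =>
    if pvAintv d - pvAintv stop = 1 then pvAinner d rest
    else (stop, d, rest, false)                     -- break: digit d becomes the next start_digit

-- the outer 'while not done' loop; fuel bounds the iterations (each round consumes ≥ 1 char)
def pvAouter : Nat → List Char → Char → List Char → List Char
  | 0, _, _, r => r
  | fuel + 1, chars, start, r =>
    match pvAinner start chars with
    | (stop, start', rest, done) =>
      let r' := if start = stop then r ++ [start]
                else if pvAintv stop - pvAintv start = 1 then r ++ [start, stop]
                else r ++ [start, '-', stop]
      if done then r' else pvAouter fuel rest start' r'

def single_pattern (prefix5d : String) (trailing_digits : String) (home_npa : String) (hnpalocal7d : Bool) : String :=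
  match trailing_digits.toList with
  | [] => ""                                        -- Python raises StopIteration here; outside Pre_
  | c :: cs =>
    let r0 := pvAouter (cs.length + 1) cs c []
    let r1 := if r0 = ['0', '-', '9'] then ['X'] else r0
    let r2 := if r1.length > 1 then '[' :: (r1 ++ [']']) else r1
    let full := prefix5d.toList ++ r2
    if hnpalocal7d && PySem.Chars.startswith prefix5d.toList home_npa.toList then
      String.ofList (['\\', '+', '1'] ++ home_npa.toList ++ ['.'] ++ PySem.List.slice full (some 3) none ++ ['X', 'X', 'X', 'X'])
    else
      String.ofList (['\\', '+', '1', '.'] ++ full ++ ['X', 'X', 'X', 'X'])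

-- ===== PORT B =====

-- run_len: number of +1 steps at the front (prev = digs[k], scanning digs[k+1:])
def pvBrunLen (prev : Char) : List Char → Nat
  | [] => 0
  | d :: rest =>
    if (d.toNat : Int) - (prev.toNat : Int) = 1 then pvBrunLen d rest + 1 else 0

-- render: split off the maximal front run of length k+1, render it from k, recurse on the rest
def pvBrender : List Char → List Char
  | [] => []
  | c :: cs =>
    let k := pvBrunLen c cs
    let run := (c :: cs).take (k + 1)
    let stop := run.getLastD c                       -- run[-1]; run is nonempty, default unused
    (if k = 0 then [c]
     else if k = 1 then [c, stop]
     else [c, '-', stop]) ++ pvBrender (cs.drop k)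
  termination_by l => l.length
  decreasing_by simp only [List.length_drop, List.length_cons]; omega

def single_pattern_alt (prefix5d : String) (trailing_digits : String) (home_npa : String) (hnpalocal7d : Bool) : String :=
  let core := pvBrender trailing_digits.toList
  -- one if/elif: '0-9' collapses to 'X' (length 1, so never bracketed), else bracket iff long
  let core2 := if core = ['0', '-', '9'] then ['X']
               else if core.length > 1 then '[' :: core ++ [']'] else core
  let body := prefix5d.toList ++ core2
  if hnpalocal7d && PySem.Chars.startswith prefix5d.toList home_npa.toList then
    -- r[3:] with nonnegative literal start is exactly List.drop 3 (short lists clamp to [])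
    String.ofList ('\\' :: '+' :: '1' :: home_npa.toList ++ '.' :: body.drop 3 ++ ['X', 'X', 'X', 'X'])
  else
    String.ofList ('\\' :: '+' :: '1' :: '.' :: body ++ ['X', 'X', 'X', 'X'])

-- ===== PRECONDITION & SPEC =====
-- Pre_ excludes exactly the inputs where the Python A raises: an empty trailing_digits
-- (StopIteration from next()) and a non-digit character in a trailing_digits of length ≥ 2
-- (ValueError from int(); with a single character int() is never called and A returns).
def Pre_single_pattern (prefix5d : String) (trailing_digits : String) (home_npa : String) (hnpalocal7d : Bool) : Prop :=
  trailing_digits.toList ≠ [] ∧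
    (trailing_digits.toList.length = 1 ∨ trailing_digits.toList.all (fun c => c.isDigit) = true)
instance (prefix5d : String) (trailing_digits : String) (home_npa : String) (hnpalocal7d : Bool) : Decidable (Pre_single_pattern prefix5d trailing_digits home_npa hnpalocal7d) := by unfold Pre_single_pattern; infer_instance

def pvWitness_single_pattern : String × String × String × Bool := ("21255", "1234", "212", true)

def Spec_single_pattern (prefix5d : String) (trailing_digits : String) (home_npa : String) (hnpalocal7d : Bool) (out : String) : Prop := out = single_pattern_alt prefix5d trailing_digits home_npa hnpalocal7d
instance (prefix5d : String) (trailing_digits : String) (home_npa : String) (hnpalocal7d : Bool) (out : String) : Decidable (Spec_single_pattern prefix5d trailing_digits home_npa hnpalocal7d out) := by unfold Spec_single_pattern; infer_instance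

-- ===== CLAIM (what is proved, stated in full; the proofs are below) =====
def Claim_equal_single_pattern : Prop := ∀ (prefix5d : String) (trailing_digits : String) (home_npa : String) (hnpalocal7d : Bool), Dom_single_pattern prefix5d trailing_digits home_npa hnpalocal7d → Pre_single_pattern prefix5d trailing_digits home_npa hnpalocal7d → Spec_single_pattern prefix5d trailing_digits home_npa hnpalocal7d (single_pattern prefix5d trailing_digits home_npa hnpalocal7d)

-- ===== LEMMAS AND PROOFS =====

-- A's inner loop, characterised by B's run length k = pvBrunLen prev cs:
-- stop is the last element of the run, and the continuation is cs.drop k.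
-- A's inner loop, characterised by B's run length k = pvBrunLen prev cs:
-- stop is the last element of the run ((cs.take k).getLastD prev), the rest is cs.drop k.
lemma pvAinner_char (cs : List Char) : ∀ prev : Char,
    pvAinner prev cs =
      (match cs.drop (pvBrunLen prev cs) with
       | [] => ((cs.take (pvBrunLen prev cs)).getLastD prev,
                (cs.take (pvBrunLen prev cs)).getLastD prev, [], true)
       | d :: rest => ((cs.take (pvBrunLen prev cs)).getLastD prev, d, rest, false)) ∧
    pvAintv ((cs.take (pvBrunLen prev cs)).getLastD prev) - pvAintv prev
      = (pvBrunLen prev cs : Int) := by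
  induction cs with
  | nil => intro prev; simp [pvAinner, pvBrunLen]
  | cons d rest ih =>
    intro prev
    by_cases h : (d.toNat : Int) - (prev.toNat : Int) = 1
    · have h' : pvAintv d - pvAintv prev = 1 := by simp only [pvAintv]; omega
      obtain ⟨ih1, ih2⟩ := ih d
      have hbl : pvBrunLen prev (d :: rest) = pvBrunLen d rest + 1 := by
        simp [pvBrunLen, h]
      have hstep : pvAinner prev (d :: rest) = pvAinner d rest := by
        simp [pvAinner, h']
      rw [hstep, hbl]
      simp only [List.take_succ_cons, List.getLastD_cons, List.drop_succ_cons]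
      refine ⟨ih1, ?_⟩
      have : pvAintv ((rest.take (pvBrunLen d rest)).getLastD d) - pvAintv d
          = (pvBrunLen d rest : Int) := ih2
      push_cast
      linarith
    · have h' : ¬ pvAintv d - pvAintv prev = 1 := by simp only [pvAintv]; omega
      simp [pvAinner, pvBrunLen, h, h']

-- the rendering if-chain in A's loop body equals B's k-based chain
lemma pvPiece (start stop : Char) (k : Nat) (r : List Char)
    (h2 : pvAintv stop - pvAintv start = (k : Int)) (hk0 : k = 0 → stop = start) :
    (if start = stop then r ++ [start]
     else if pvAintv stop - pvAintv start = 1 then r ++ [start, stop]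
     else r ++ [start, '-', stop]) =
    r ++ (if k = 0 then [start] else if k = 1 then [start, stop] else [start, '-', stop]) := by
  by_cases e0 : k = 0
  · rw [hk0 e0, if_pos rfl, if_pos e0]
  · have hne : start ≠ stop := by
      intro e; rw [e] at h2; simp at h2; omega
    by_cases e1 : k = 1
    · rw [if_neg hne, if_pos (by rw [h2, e1]; rfl), if_neg e0, if_pos e1]
    · have hd : ¬ pvAintv stop - pvAintv start = 1 := by rw [h2]; omega
      rw [if_neg hne, if_neg hd, if_neg e0, if_neg e1]

-- A's outer loop accumulates exactly B's rendered runs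
lemma pvAouter_eq (fuel : Nat) : ∀ (cs : List Char) (start : Char) (r : List Char),
    cs.length < fuel →
    pvAouter fuel cs start r = r ++ pvBrender (start :: cs) := by
  induction fuel with
  | zero => intro cs start r h; omega
  | succ fuel ih =>
    intro cs start r hlen
    obtain ⟨h1, h2⟩ := pvAinner_char cs start
    have hk0 : pvBrunLen start cs = 0 → (cs.take (pvBrunLen start cs)).getLastD start = start := by
      intro h0; rw [h0]; simp
    rw [pvBrender]
    simp only [List.take_succ_cons, List.getLastD_cons]
    cases hdr : cs.drop (pvBrunLen start cs) with
    | nil =>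
      rw [hdr] at h1
      simp only [pvAouter, h1, if_pos, pvBrender, List.append_nil]
      exact pvPiece start _ (pvBrunLen start cs) r h2 hk0
    | cons d rest =>
      have hrl : rest.length < fuel := by
        have := congrArg List.length hdr
        simp only [List.length_drop, List.length_cons] at this
        omega
      rw [hdr] at h1
      simp only [pvAouter, h1, Bool.false_eq_true, if_false]
      rw [ih rest d _ hrl, pvPiece start _ (pvBrunLen start cs) r h2 hk0]
      simp

-- the '0-9'/length post-processing: A's two sequential ifs equal B's if/elif
lemma pvPost (r0 : List Char) :
    (if (if r0 = ['0', '-', '9'] then ['X'] else r0).length > 1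
      then '[' :: ((if r0 = ['0', '-', '9'] then ['X'] else r0) ++ [']'])
      else (if r0 = ['0', '-', '9'] then ['X'] else r0)) =
    (if r0 = ['0', '-', '9'] then ['X']
      else if r0.length > 1 then '[' :: r0 ++ [']'] else r0) := by
  split_ifs <;> simp_all

-- ===== VERDICT (by name: the statement is the Claim_ definition above) =====
theorem single_pattern_spec : Claim_equal_single_pattern := by
  intro prefix5d trailing_digits home_npa hnpalocal7d _ hpre
  unfold Spec_single_pattern single_pattern single_pattern_alt
  cases htd : trailing_digits.toList with
  | nil => exact absurd htd hpre.1
  | cons c cs =>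
    simp only [pvAouter_eq (cs.length + 1) cs c [] (Nat.lt_succ_self _), List.nil_append, pvPost,
               PySem.List.slice_from _ (by norm_num : (0:Int) ≤ 3)]
    norm_num
    split <;> simp
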